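-- pv_equiv track=rewrite | github.com/Scarygami/aoc2019 | 04/04.py | valid1
-- ===== SOURCE A (Python) =====
-- def valid1(code):
--     doubles = False
--     last_c = ""
--     for c in str(code):
--         if c < last_c:
--             return False
--         if c == last_c:
--             doubles = True
--         else:
--             last_c = c
--
--     return doubles
-- ===== SOURCE B (Python) =====
-- def valid1(code):
--     s = str(code)
--     return list(s) == sorted(s) and len(set(s)) < len(s)
-- ===== Notes on version B (the rewrite author's own statement) =====
-- stated objective: simpler
-- what changed: Replaces A's stateful single scan (last-char tracking with early return) by a sort-and-set formulation: the digit string is non-decreasing iff it equals its sorted copy, and under that order a repeated character is exactly an adjacent double, detected by len(set(s)) < len(s).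
import Mathlib
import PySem

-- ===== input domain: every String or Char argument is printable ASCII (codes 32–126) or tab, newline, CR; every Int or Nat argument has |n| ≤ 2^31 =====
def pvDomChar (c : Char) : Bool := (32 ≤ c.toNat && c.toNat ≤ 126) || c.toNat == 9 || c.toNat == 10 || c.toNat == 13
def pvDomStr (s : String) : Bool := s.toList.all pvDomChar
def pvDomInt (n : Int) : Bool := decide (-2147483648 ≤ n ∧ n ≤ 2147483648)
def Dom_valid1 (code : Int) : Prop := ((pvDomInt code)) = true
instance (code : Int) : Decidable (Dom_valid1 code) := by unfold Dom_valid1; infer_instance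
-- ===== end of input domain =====

-- B changes A's stateful left-to-right scan into a sort-and-set formulation; objective: simpler.

-- ===== PORT A =====
-- A's loop over str(code): state (doubles, last_c); last_c = none models Python's initial "",
-- for which both 'c < ""' and 'c == ""' are False, so the first character always takes the else branch.
def valid1Loop : List Char → Bool → Option Char → Bool
  | [], doubles, _ => doubles
  | c :: rest, doubles, last =>
    match last with
    | none => valid1Loop rest doubles (some c)
    | some l =>
      if c < l then false
      else if c = l then valid1Loop rest true (some l)
      else valid1Loop rest doubles (some c)

def valid1 (code : Int) : Bool := valid1Loop (PySem.Int.toChars code) false none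

-- ===== PORT B =====
def valid1_alt (code : Int) : Bool :=
  let s := PySem.Int.toChars code
  decide (s = PySem.List.sorted s (fun x => x) false)
    && decide ((PySem.Set.ofList s).length < s.length)

-- ===== PRECONDITION & SPEC =====
def Spec_valid1 (code : Int) (out : Bool) : Prop := out = valid1_alt code
instance (code : Int) (out : Bool) : Decidable (Spec_valid1 code out) := by unfold Spec_valid1; infer_instance

-- ===== CLAIM (what is proved, stated in full; the proofs are below) =====
def Claim_equal_valid1 : Prop := ∀ (code : Int), Dom_valid1 code → Spec_valid1 code (valid1 code)

-- ===== LEMMAS AND PROOFS =====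

-- adjacent duplicate present
def adjDup : List Char → Bool
  | [] => false
  | [_] => false
  | a :: b :: t => (a = b) || adjDup (b :: t)

theorem valid1Loop_eq (s : List Char) : ∀ (d : Bool) (l : Char),
    valid1Loop s d (some l)
      = (decide (List.IsChain (· ≤ ·) (l :: s)) && (d || adjDup (l :: s))) := by
  induction s with
  | nil => intro d l; simp [valid1Loop, adjDup]
  | cons c rest ih =>
    intro d l
    simp only [valid1Loop]
    by_cases hlt : c < l
    · simp [List.isChain_cons_cons, hlt, not_le.mpr hlt]
    · by_cases heq : c = l
      · subst heq
        rw [ih]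
        simp [adjDup, List.isChain_cons_cons]
      · rw [if_neg hlt, if_neg heq, ih]
        have hle : l ≤ c := le_of_not_gt hlt
        simp [adjDup, List.isChain_cons_cons, hle, Ne.symm heq]

theorem valid1_eq (code : Int) :
    valid1 code
      = (decide (List.IsChain (· ≤ ·) (PySem.Int.toChars code))
          && adjDup (PySem.Int.toChars code)) := by
  unfold valid1
  cases h : PySem.Int.toChars code with
  | nil => simp [valid1Loop, adjDup]
  | cons c rest => simp [valid1Loop, valid1Loop_eq]

theorem sorted_self_iff_chain (s : List Char) :
    (s = PySem.List.sorted s (fun x => x) false) ↔ List.IsChain (· ≤ ·) s := by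
  rw [List.isChain_iff_pairwise]
  constructor
  · intro h
    have := PySem.List.sorted_pairwise s (fun x => x) (κ := Char)
    rw [← h] at this
    exact this
  · intro h
    exact (PySem.List.sorted_eq_self_of_pairwise s (fun x => x) h).symm

theorem adjDup_iff_not_nodup (s : List Char) (hs : s.Pairwise (· ≤ ·)) :
    adjDup s = true ↔ ¬ s.Nodup := by
  induction s with
  | nil => simp [adjDup]
  | cons a t ih =>
    rcases List.pairwise_cons.mp hs with ⟨ha, ht⟩
    cases t with
    | nil => simp [adjDup]
    | cons b u =>
      by_cases hab : a = b
      · subst hab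
        simp [adjDup, List.nodup_cons]
      · have hanotin : a ∉ b :: u := by
          intro hmem
          rcases hmem with _ | hu
          · exact hab rfl
          · have hab' : a ≤ b := ha b (List.mem_cons_self ..)
            have hba : b ≤ a := by
              rcases List.pairwise_cons.mp ht with ⟨hb, _⟩
              exact hb a (by assumption)
            exact hab (le_antisymm hab' hba)
        have h2 := ih ht
        simp only [adjDup, Bool.or_eq_true, decide_eq_true_eq, List.nodup_cons] at h2 ⊢
        tauto

theorem len_ofList_lt_of_not_nodup (s : List Char) (h : ¬ s.Nodup) :
    (PySem.Set.ofList s).length < s.length := by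
  induction s using List.reverseRecOn with
  | nil => simp at h
  | append_singleton xs x ih =>
    rw [PySem.Set.ofList_append_singleton, PySem.Set.add_eq_ite]
    by_cases hn : xs.Nodup
    · have hx : x ∈ xs := by
        by_contra hx
        refine h ?_
        rw [List.nodup_append]
        refine ⟨hn, List.nodup_singleton x, ?_⟩
        intro a ha b hb
        simp only [List.mem_singleton] at hb
        subst hb
        exact fun h' => hx (h' ▸ ha)
      rw [PySem.Set.ofList_eq_self_of_nodup xs hn]
      simp [hx]
    · have hlt := ih hn
      split_ifs <;> simp [List.length_append] <;> omega

theorem not_nodup_iff_ofList_lt (s : List Char) :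
    ¬ s.Nodup ↔ (PySem.Set.ofList s).length < s.length := by
  constructor
  · exact len_ofList_lt_of_not_nodup s
  · intro h hnd
    rw [PySem.Set.ofList_eq_self_of_nodup s hnd] at h
    exact lt_irrefl _ h

-- ===== VERDICT (by name: the statement is the Claim_ definition above) =====
theorem valid1_spec : Claim_equal_valid1 := by
  intro code _
  unfold Spec_valid1 valid1_alt
  dsimp only
  rw [valid1_eq]
  set s := PySem.Int.toChars code with hs
  rw [decide_eq_decide.mpr (sorted_self_iff_chain s)]
  by_cases hc : List.IsChain (· ≤ ·) s
  · have hpw := List.isChain_iff_pairwise.mp hc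
    have hiff : adjDup s = true ↔ (PySem.Set.ofList s).length < s.length :=
      (adjDup_iff_not_nodup s hpw).trans (not_nodup_iff_ofList_lt s)
    have h2 : adjDup s = decide ((PySem.Set.ofList s).length < s.length) := by
      rw [Bool.eq_iff_iff]
      simp [hiff]
    rw [h2]
  · simp [hc]
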